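-- pv_equiv track=rewrite | github.com/AntonyDamico/grafos_django | src/tipos/servicio.py | hamilton
-- ===== SOURCE A (Python) =====
-- def hamilton(grados):
-- 	"""Calcula si el grafo contiene circuito o camino hamiltoniano"""
-- 	maximo = 0
-- 	condicion = len(grados) - 1
-- 	for i in range(len(grados) - 1):
-- 		for j in range(i + 1,len(grados)):
-- 			suma = grados[i] + grados[j]
-- 			maximo = max(maximo,suma)
-- 	if maximo > condicion: return 'Existe camino y circuito hamiltoniano'
-- 	return 'No existe circuito ni camino hamiltoniano'
-- ===== SOURCE B (Python) =====
-- def hamilton(grados):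
-- 	"""Calcula si el grafo contiene circuito o camino hamiltoniano"""
-- 	s = sorted(grados, reverse=True)
-- 	if len(s) < 2:
-- 		maximo = 0
-- 	else:
-- 		maximo = max(0, s[0] + s[1])
-- 	if maximo > len(grados) - 1: return 'Existe camino y circuito hamiltoniano'
-- 	return 'No existe circuito ni camino hamiltoniano'
-- ===== Notes on version B (the rewrite author's own statement) =====
-- stated objective: faster
-- what changed: Replaces the O(n^2) all-pairs nested scan with a single sort: the two largest degrees give the maximum pairwise sum (floored at 0, the loop's initial maximo), then the same comparison against len-1.
import Mathlib
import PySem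

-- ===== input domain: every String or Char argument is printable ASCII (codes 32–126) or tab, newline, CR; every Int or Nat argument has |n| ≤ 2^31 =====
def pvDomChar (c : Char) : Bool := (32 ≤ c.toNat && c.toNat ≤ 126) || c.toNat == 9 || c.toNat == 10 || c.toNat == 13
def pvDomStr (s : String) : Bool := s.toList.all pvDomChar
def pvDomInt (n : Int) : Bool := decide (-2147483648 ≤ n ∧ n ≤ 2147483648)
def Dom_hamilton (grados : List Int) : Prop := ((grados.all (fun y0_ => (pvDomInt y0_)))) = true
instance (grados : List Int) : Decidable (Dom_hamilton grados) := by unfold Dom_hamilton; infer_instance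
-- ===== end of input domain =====

-- B replaces A's O(n^2) all-pairs scan by sorting once (descending) and taking the two largest degrees.

-- ===== PORT A =====
-- Literal port of A's nested index loops; grados[i]/grados[j] are ported as pyGetD with
-- default 0, exact here because both indices are always in range (0 ≤ i < j < len).
def hamilton (grados : List Int) : String :=
  let n : Int := (grados.length : Int)
  let condicion : Int := n - 1
  let maximo : Int :=
    (PySem.List.pyRange 0 (n - 1) 1).foldl (fun m i =>
      (PySem.List.pyRange (i + 1) n 1).foldl (fun m j =>
        max m (PySem.List.pyGetD grados i 0 + PySem.List.pyGetD grados j 0)) m) 0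
  if maximo > condicion then "Existe camino y circuito hamiltoniano"
  else "No existe circuito ni camino hamiltoniano"

-- ===== PORT B =====
-- Port of Source B: sorted(grados, reverse=True), top-two sum floored at 0; s[0]/s[1] ported as
-- pyGetD with default 0, exact because the branch guarantees len(s) ≥ 2.
def hamilton_alt (grados : List Int) : String :=
  let s : List Int := PySem.List.sorted grados (fun x => x) true
  let maximo : Int :=
    if s.length < 2 then 0
    else max 0 (PySem.List.pyGetD s 0 0 + PySem.List.pyGetD s 1 0)
  if maximo > (grados.length : Int) - 1 then "Existe camino y circuito hamiltoniano"
  else "No existe circuito ni camino hamiltoniano"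

-- ===== PRECONDITION & SPEC =====
def Spec_hamilton (grados : List Int) (out : String) : Prop := out = hamilton_alt grados
instance (grados : List Int) (out : String) : Decidable (Spec_hamilton grados out) := by unfold Spec_hamilton; infer_instance

-- ===== CLAIM (what is proved, stated in full; the proofs are below) =====
def Claim_equal_hamilton : Prop := ∀ (grados : List Int), Dom_hamilton grados → Spec_hamilton grados (hamilton grados)

-- ===== LEMMAS AND PROOFS =====

/-- The multiset of pairwise sums grados[i] + grados[j], i < j, in A's traversal order. -/
def pairSums : List Int → List Int
  | [] => []
  | x :: xs => xs.map (x + ·) ++ pairSums xs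

theorem pairSums_cons (x : Int) (xs : List Int) :
    pairSums (x :: xs) = xs.map (x + ·) ++ pairSums xs := rfl

theorem pairSums_nil_of_len_le_one (l : List Int) (h : l.length ≤ 1) : pairSums l = [] := by
  match l, h with
  | [], _ => rfl
  | [x], _ => rfl

theorem pairSums_perm {l l' : List Int} (h : l.Perm l') : (pairSums l).Perm (pairSums l') := by
  induction h with
  | nil => exact List.Perm.refl _
  | cons x h ih => exact List.Perm.append (h.map _) ih
  | swap x y t =>
      simp only [pairSums, List.map_cons, List.cons_append]
      rw [add_comm y x]
      refine List.Perm.cons _ ?_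
      rw [← List.append_assoc, ← List.append_assoc]
      exact List.Perm.append_right _ List.perm_append_comm
  | trans _ _ ih1 ih2 => exact ih1.trans ih2

theorem foldl_max_of_le {l : List Int} {c : Int} (h : ∀ x ∈ l, x ≤ c) :
    l.foldl max c = c := by
  induction l with
  | nil => rfl
  | cons x t ih =>
      have hx : max c x = c := max_eq_left (h x (by simp))
      simpa [hx] using ih (fun y hy => h y (by simp [hy]))

theorem pairSums_bounded {l : List Int} {c : Int} (h : ∀ x ∈ l, x ≤ c) :
    ∀ z ∈ pairSums l, z ≤ c + c := by
  induction l with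
  | nil => simp [pairSums]
  | cons x t ih =>
      intro z hz
      rw [pairSums_cons] at hz
      simp only [List.mem_append, List.mem_map] at hz
      rcases hz with ⟨y, hy, rfl⟩ | hz
      · have h1 := h x (by simp)
        have h2 := h y (by simp [hy])
        omega
      · exact ih (fun y hy => h y (by simp [hy])) z hz

/-- A's inner loop over j ∈ range(a, len g) is a fold of max over the mapped suffix. -/
theorem inner_loop (g : List Int) (x : Int) :
    ∀ (k a : Nat), g.length - a = k → ∀ m : Int,
      (PySem.List.pyRange (a : Int) (g.length : Int) 1).foldl
        (fun m j => max m (x + PySem.List.pyGetD g j 0)) m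
      = ((g.drop a).map (x + ·)).foldl max m := by
  intro k
  induction k with
  | zero =>
      intro a hk m
      have hle : g.length ≤ a := by omega
      rw [PySem.List.pyRange_one_eq_nil (by exact_mod_cast hle), List.drop_eq_nil_of_le hle]
      rfl
  | succ k ih =>
      intro a hk m
      have hlt : a < g.length := by omega
      rw [PySem.List.pyRange_one_cons (by exact_mod_cast hlt)]
      have hdrop : g.drop a = g[a] :: g.drop (a + 1) := List.drop_eq_getElem_cons hlt
      rw [hdrop]
      simp only [List.foldl_cons, List.map_cons]
      have hget : PySem.List.pyGetD g (a : Int) 0 = g[a] := by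
        rw [PySem.List.pyGetD_natCast]
        exact List.getD_eq_getElem g 0 hlt
      have hcast : ((a : Int) + 1) = ((a + 1 : Nat) : Int) := by push_cast; ring
      rw [hget, hcast, ih (a + 1) (by omega)]

/-- A's outer loop from index a computes the running max of pairSums of the suffix. -/
theorem outer_loop (g : List Int) :
    ∀ (k a : Nat), g.length - a = k → ∀ m : Int,
      (PySem.List.pyRange (a : Int) ((g.length : Int) - 1) 1).foldl
        (fun m i =>
          (PySem.List.pyRange (i + 1) ((g.length : Int)) 1).foldl
            (fun m j => max m (PySem.List.pyGetD g i 0 + PySem.List.pyGetD g j 0)) m) m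
      = (pairSums (g.drop a)).foldl max m := by
  intro k
  induction k with
  | zero =>
      intro a hk m
      have hle : g.length ≤ a := by omega
      have hc : (g.length : Int) ≤ (a : Int) := by exact_mod_cast hle
      rw [PySem.List.pyRange_one_eq_nil (by omega), List.drop_eq_nil_of_le hle]
      rfl
  | succ k ih =>
      intro a hk m
      by_cases hend : g.length ≤ a + 1
      · -- last index: outer range empty, suffix has ≤ 1 element
        have hc : (g.length : Int) ≤ (a : Int) + 1 := by exact_mod_cast hend
        rw [PySem.List.pyRange_one_eq_nil (by omega),
            pairSums_nil_of_len_le_one _ (by simp; omega)]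
        rfl
      · have hlt : a < g.length := by omega
        have ha1 : (a : Int) < (g.length : Int) - 1 := by
          have : a + 1 < g.length := by omega
          omega
        rw [PySem.List.pyRange_one_cons ha1]
        simp only [List.foldl_cons]
        have hget : PySem.List.pyGetD g (a : Int) 0 = g[a] := by
          rw [PySem.List.pyGetD_natCast]
          exact List.getD_eq_getElem g 0 hlt
        have hcast : ((a : Int) + 1) = ((a + 1 : Nat) : Int) := by push_cast; ring
        rw [hget, hcast,
            inner_loop g (g[a]) (g.length - (a + 1)) (a + 1) rfl m,
            ih (a + 1) (by omega)]
        have hdrop : g.drop a = g[a] :: g.drop (a + 1) := List.drop_eq_getElem_cons hlt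
        rw [hdrop, pairSums_cons, List.foldl_append]

/-- For a descending-sorted list, the max over pairSums starting at 0 is the top-two sum floored at 0. -/
theorem pairSums_foldl_sorted (s : List Int) (hs : s.Pairwise (fun a b => b ≤ a)) :
    (pairSums s).foldl max 0
      = if s.length < 2 then 0
        else max 0 (PySem.List.pyGetD s 0 0 + PySem.List.pyGetD s 1 0) := by
  match s, hs with
  | [], _ => rfl
  | [x], _ => rfl
  | a :: b :: t, hs =>
      have hab : b ≤ a := (List.pairwise_cons.mp hs).1 b (by simp)
      have hbt : ∀ y ∈ t, y ≤ b :=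
        fun y hy => (List.pairwise_cons.mp (List.pairwise_cons.mp hs).2).1 y hy
      have hat : ∀ y ∈ t, y ≤ a := fun y hy => le_trans (hbt y hy) hab
      rw [pairSums_cons, List.map_cons, List.cons_append, List.foldl_cons, List.foldl_append]
      have hbound : ∀ z ∈ List.map (a + ·) t ++ pairSums (b :: t), z ≤ max 0 (a + b) := by
        intro z hz
        refine le_trans ?_ (le_max_right 0 (a + b))
        rcases List.mem_append.mp hz with hz | hz
        · rcases List.mem_map.mp hz with ⟨y, hy, rfl⟩
          have := hbt y hy
          omega
        · have hc : ∀ x ∈ b :: t, x ≤ b := by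
            intro x hx
            rcases List.mem_cons.mp hx with rfl | hx
            · exact le_refl _
            · exact hbt x hx
          have := pairSums_bounded hc z hz
          omega
      rw [foldl_max_of_le (fun x hx => hbound x (List.mem_append.mpr (Or.inl hx))),
          foldl_max_of_le (fun x hx => hbound x (List.mem_append.mpr (Or.inr hx)))]
      simp [PySem.List.pyGetD]

-- ===== VERDICT (by name: the statement is the Claim_ definition above) =====
theorem hamilton_spec : Claim_equal_hamilton := by
  intro grados _
  show hamilton grados = hamilton_alt grados
  have key :
      (PySem.List.pyRange 0 ((grados.length : Int) - 1) 1).foldl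
        (fun m i =>
          (PySem.List.pyRange (i + 1) ((grados.length : Int)) 1).foldl
            (fun m j => max m (PySem.List.pyGetD grados i 0 + PySem.List.pyGetD grados j 0)) m) 0
      = (if (PySem.List.sorted grados (fun x => x) true).length < 2 then 0
         else max 0 (PySem.List.pyGetD (PySem.List.sorted grados (fun x => x) true) 0 0
                     + PySem.List.pyGetD (PySem.List.sorted grados (fun x => x) true) 1 0)) := by
    have hA := outer_loop grados grados.length 0 (by omega) 0
    simp only [Nat.cast_zero, List.drop_zero] at hA
    have hperm : (pairSums grados).Perm (pairSums (PySem.List.sorted grados (fun x => x) true)) :=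
      pairSums_perm (PySem.List.sorted_perm grados (fun x => x) true).symm
    have hsorted : (PySem.List.sorted grados (fun x => x) true).Pairwise (fun a b => b ≤ a) := by
      simpa using PySem.List.sorted_pairwise_rev grados (fun x => x)
    rw [hA, List.Perm.foldl_op_eq hperm, pairSums_foldl_sorted _ hsorted]
  unfold hamilton hamilton_alt
  simp only [key]
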